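-- pv_equiv track=rewrite | github.com/clockwork72/RQ1 | code/pipeline/patterns.py | _is_delegation_statement
-- ===== SOURCE A (Python) =====
-- def _is_delegation_statement(source_text: str) -> bool:
--     """Detect delegation statements where processing is outsourced."""
--     text = source_text.lower()
--     return any(phrase in text for phrase in (
--         "does not process your credit card",
--         "does not receive or store your payment",
--         "does not store your credit card",
--         "does not store credit card",
--         "does not handle your payment",
--         "instead uses a third party",
--         "instead we use",
--         "rely on trusted third-party",
--         "relies on a third-party",
--         "handled by our payment processor",
--         "processed by our payment partner",
--     ))
-- ===== SOURCE B (Python) =====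
-- _PHRASES = (
--     "does not process your credit card",
--     "does not receive or store your payment",
--     "does not store your credit card",
--     "does not store credit card",
--     "does not handle your payment",
--     "instead uses a third party",
--     "instead we use",
--     "rely on trusted third-party",
--     "relies on a third-party",
--     "handled by our payment processor",
--     "processed by our payment partner",
-- )
--
--
-- def _is_delegation_statement(source_text: str) -> bool:
--     """Single left-to-right pass: at each position, check whether any
--     delegation phrase starts there (instead of eleven independent scans)."""
--     text = source_text.lower()
--     for i in range(len(text)):
--         if any(text.startswith(p, i) for p in _PHRASES):
--             return True
--     return False
-- ===== Notes on version B (the rewrite author's own statement) =====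
-- stated objective: alternative
-- what changed: Replaces eleven independent substring-containment scans of the lowercased text with one left-to-right pass over positions that checks whether any phrase starts at the current position.
import Mathlib
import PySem

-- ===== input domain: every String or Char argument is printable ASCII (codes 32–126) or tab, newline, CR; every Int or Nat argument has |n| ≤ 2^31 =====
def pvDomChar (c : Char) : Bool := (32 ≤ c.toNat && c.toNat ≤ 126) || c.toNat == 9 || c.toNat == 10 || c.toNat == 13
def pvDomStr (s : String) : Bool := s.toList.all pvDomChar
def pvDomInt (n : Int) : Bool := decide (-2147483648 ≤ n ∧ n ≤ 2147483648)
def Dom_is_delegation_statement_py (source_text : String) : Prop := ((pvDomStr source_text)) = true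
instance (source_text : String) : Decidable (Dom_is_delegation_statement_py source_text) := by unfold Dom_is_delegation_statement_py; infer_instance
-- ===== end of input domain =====

-- B changes the traversal (one pass over positions checking each phrase as a prefix,
-- instead of eleven independent substring scans); same result on every input.

-- the shared phrase tuple
def pvPhrases : List String := [
  "does not process your credit card",
  "does not receive or store your payment",
  "does not store your credit card",
  "does not store credit card",
  "does not handle your payment",
  "instead uses a third party",
  "instead we use",
  "rely on trusted third-party",
  "relies on a third-party",
  "handled by our payment processor",
  "processed by our payment partner"]

-- ===== PORT A =====
-- any(phrase in text for phrase in (...)) after text = source_text.lower()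
def is_delegation_statement_py (source_text : String) : Bool :=
  let text := PySem.Str.lower source_text
  pvPhrases.any (fun phrase => PySem.Str.isIn phrase text)

-- ===== PORT B =====
-- for i in range(len(text)): if any(text.startswith(p, i) ...): return True
-- (text.startswith(p, i) with 0 ≤ i ≤ len is exactly: p is a prefix of List.drop i; exact here)
def is_delegation_statement_py_alt (source_text : String) : Bool :=
  let text := (PySem.Str.lower source_text).toList
  (List.range text.length).any (fun i =>
    pvPhrases.any (fun p => PySem.Chars.startswith (text.drop i) p.toList))

-- ===== PRECONDITION & SPEC =====
def Spec_is_delegation_statement_py (source_text : String) (out : Bool) : Prop := out = is_delegation_statement_py_alt source_text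
instance (source_text : String) (out : Bool) : Decidable (Spec_is_delegation_statement_py source_text out) := by unfold Spec_is_delegation_statement_py; infer_instance

-- ===== CLAIM (what is proved, stated in full; the proofs are below) =====
def Claim_equal_is_delegation_statement_py : Prop := ∀ (source_text : String), Dom_is_delegation_statement_py source_text → Spec_is_delegation_statement_py source_text (is_delegation_statement_py source_text)

-- ===== LEMMAS AND PROOFS =====

lemma pvPhrases_ne_nil : ∀ p ∈ pvPhrases, p.toList ≠ [] := by decide

-- substring containment of each (nonempty) phrase = some in-range position where it is a prefix
lemma pv_key (t : List Char) :
    pvPhrases.any (fun phrase => PySem.Chars.isIn phrase.toList t)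
      = (List.range t.length).any (fun i =>
          pvPhrases.any (fun p => PySem.Chars.startswith (t.drop i) p.toList)) := by
  rw [Bool.eq_iff_iff]
  simp only [List.any_eq_true, List.mem_range, PySem.Chars.isIn_iff_infix,
    PySem.Chars.startswith_iff]
  constructor
  · rintro ⟨p, hp, hinf⟩
    obtain ⟨j, hj⟩ := (PySem.Chars.exists_prefix_drop_iff_isIn p.toList t).mpr
      ((PySem.Chars.isIn_iff_infix p.toList t).mpr hinf)
    by_cases hjl : j < t.length
    · exact ⟨j, hjl, p, hp, hj⟩
    · exfalso
      have hnil : t.drop j = [] := List.drop_eq_nil_of_le (le_of_not_gt hjl)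
      rw [hnil] at hj
      exact pvPhrases_ne_nil p hp (List.prefix_nil.mp hj)
  · rintro ⟨i, _, p, hp, hpre⟩
    exact ⟨p, hp, (PySem.Chars.isIn_iff_infix p.toList t).mp
      ((PySem.Chars.exists_prefix_drop_iff_isIn p.toList t).mp ⟨i, hpre⟩)⟩

-- ===== VERDICT (by name: the statement is the Claim_ definition above) =====
theorem is_delegation_statement_py_spec : Claim_equal_is_delegation_statement_py := by
  intro s _
  unfold Spec_is_delegation_statement_py is_delegation_statement_py is_delegation_statement_py_alt
  simp only [PySem.Str.isIn_eq]
  exact pv_key (PySem.Str.lower s).toList
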